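-- pv_equiv track=rewrite | github.com/selvmaya/ctf | ddc-qualifiers-2026/crypto_fibocaesar/main.py | fib_caesar_encrypt
-- ===== SOURCE A (Python) =====
-- import string
--
-- alphabet = "abcdefghijklmnopqrstuvwxyz"
--
-- def fib(n, mod):
--     def _fib(k):
--         if k == 0:
--             return (0, 1)
--         a, b = _fib(k >> 1)
--         c = (a * ((b << 1) - a)) % mod
--         d = (a * a + b * b) % mod
--
--         # where values of k are odd
--         if k & 1:
--             return (d, (c + d) % mod)
--         else:
--             return (c, d)
--
--     return _fib(n)[0]
--
-- def fib_caesar_encrypt(n, text):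
--     # find some starting values
--     a = fib(n, len(alphabet))
--     b = fib(n + 1, len(alphabet))
--
--     # shift values by a fibbonaci amount per letter position
--     out = []
--     for c in text:  # every letter corresponds to an output letter, length unchanged
--         if c in string.whitespace:  # whitespace unchanged
--             out.append(c)
--             continue
--         k = a % len(alphabet)
--         a, b = b, a + b
--         # is this just a really complicated way to figure out how much to caesar shift?
--         out.append(alphabet[(alphabet.index(c) + k) % len(alphabet)])
--     return "".join(out)
-- ===== SOURCE B (Python) =====
-- import string
--
-- alphabet = "abcdefghijklmnopqrstuvwxyz"
--
-- # Fibonacci mod 26 is periodic with Pisano period 84, so the pair (fib(n), fib(n+1)) mod 26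
-- # is reached by at most 83 steps of the simple iteration (a, b) -> (b, (a + b) % 26).
-- def fib_caesar_encrypt(n, text):
--     a, b = 0, 1
--     for _ in range(n % 84):
--         a, b = b, (a + b) % 26
--     out = []
--     for c in text:
--         if c in string.whitespace:
--             out.append(c)
--         else:
--             out.append(alphabet[(alphabet.index(c) + a) % 26])
--             a, b = b, (a + b) % 26
--     return "".join(out)
-- ===== Notes on version B (the rewrite author's own statement) =====
-- stated objective: faster
-- what changed: Replaces the recursive fast-doubling Fibonacci helper with at most 83 steps of the simple pair iteration (a,b) -> (b,(a+b)%26), using that Fibonacci mod 26 has Pisano period 84, and keeps the pair reduced mod 26 throughout the text loop.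
import Mathlib
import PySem

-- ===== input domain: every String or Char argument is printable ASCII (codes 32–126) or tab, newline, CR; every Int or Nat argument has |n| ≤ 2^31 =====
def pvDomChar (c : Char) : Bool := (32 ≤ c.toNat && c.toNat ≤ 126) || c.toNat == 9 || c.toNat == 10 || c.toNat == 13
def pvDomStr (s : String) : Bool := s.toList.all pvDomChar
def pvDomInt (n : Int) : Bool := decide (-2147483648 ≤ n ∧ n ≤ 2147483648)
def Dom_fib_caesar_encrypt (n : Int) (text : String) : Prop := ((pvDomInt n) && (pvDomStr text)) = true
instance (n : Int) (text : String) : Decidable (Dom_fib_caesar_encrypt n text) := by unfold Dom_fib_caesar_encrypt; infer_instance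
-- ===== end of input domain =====

-- B replaces A's recursive fast-doubling Fibonacci with at most 83 steps of the simple pair iteration mod 26 (Pisano period 84); simpler, no recursion.


-- ===== PORT A =====
def pvAlphabet : List Char := "abcdefghijklmnopqrstuvwxyz".toList
def pvWhitespace : List Char := [' ', '\t', '\n', '\x0b', '\x0c', '\r']  -- string.whitespace

-- A's recursive fast-doubling _fib; Python diverges (RecursionError) on negative k, so the
-- Lean port takes the Nat magnitude (Pre_ excludes n < 0).  b << 1 is transliterated as b * 2 (exact).
def pvFibA (k : Nat) (m : Int) : Int × Int :=
  if h : k = 0 then (0, 1)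
  else
    let p := pvFibA (k / 2) m
    let a := p.1
    let b := p.2
    let c := PySem.Int.mod (a * (b * 2 - a)) m
    let d := PySem.Int.mod (a * a + b * b) m
    if k % 2 = 1 then (d, PySem.Int.mod (c + d) m) else (c, d)
termination_by k
decreasing_by exact Nat.div_lt_self (Nat.pos_of_ne_zero h) (by norm_num)

def pvFib (n : Int) (m : Int) : Int := (pvFibA n.toNat m).1

-- the for-loop over text, state (a, b, out); alphabet.index raises on absent chars (Pre_ excludes), ported via .getD 0
def pvLoopA : List Char → Int → Int → List Char → List Char
  | [], _, _, out => out
  | c :: cs, a, b, out =>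
    if c ∈ pvWhitespace then pvLoopA cs a b (out ++ [c])
    else
      let k := PySem.Int.mod a 26
      let idx : Int := ((PySem.List.index? pvAlphabet c).getD 0 : Nat)
      pvLoopA cs b (a + b) (out ++ [(PySem.List.pyGet? pvAlphabet (PySem.Int.mod (idx + k) 26)).getD ' '])

def fib_caesar_encrypt (n : Int) (text : String) : String :=
  let a := pvFib n 26
  let b := pvFib (n + 1) 26
  String.ofList (pvLoopA text.toList a b [])

-- ===== PORT B =====
-- Fibonacci mod 26 has Pisano period 84: for _ in range(n % 84): a, b = b, (a + b) % 26
def pvIterB : Nat → Int × Int → Int × Int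
  | 0, p => p
  | k + 1, p => pvIterB k (p.2, PySem.Int.mod (p.1 + p.2) 26)

def pvLoopB : List Char → Int → Int → List Char → List Char
  | [], _, _, out => out
  | c :: cs, a, b, out =>
    if c ∈ pvWhitespace then pvLoopB cs a b (out ++ [c])
    else
      let idx : Int := ((PySem.List.index? pvAlphabet c).getD 0 : Nat)
      pvLoopB cs b (PySem.Int.mod (a + b) 26)
        (out ++ [(PySem.List.pyGet? pvAlphabet (PySem.Int.mod (idx + a) 26)).getD ' '])

def fib_caesar_encrypt_alt (n : Int) (text : String) : String :=
  let p := pvIterB (PySem.Int.mod n 84).toNat (0, 1)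
  String.ofList (pvLoopB text.toList p.1 p.2 [])

-- ===== PRECONDITION & SPEC =====
-- Pre_ excludes n < 0 (A's fast-doubling recursion never terminates: Python RecursionError) and texts with a
-- non-whitespace character outside the lowercase alphabet (alphabet.index raises ValueError).
def Pre_fib_caesar_encrypt (n : Int) (text : String) : Prop :=
  0 ≤ n ∧ text.toList.all (fun c => pvWhitespace.contains c || pvAlphabet.contains c) = true
instance (n : Int) (text : String) : Decidable (Pre_fib_caesar_encrypt n text) := by
  unfold Pre_fib_caesar_encrypt; infer_instance

def pvWitness_fib_caesar_encrypt : Int × String := (5, "hello world")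

def Spec_fib_caesar_encrypt (n : Int) (text : String) (out : String) : Prop := out = fib_caesar_encrypt_alt n text
instance (n : Int) (text : String) (out : String) : Decidable (Spec_fib_caesar_encrypt n text out) := by unfold Spec_fib_caesar_encrypt; infer_instance

-- ===== CLAIM (what is proved, stated in full; the proofs are below) =====
def Claim_equal_fib_caesar_encrypt : Prop := ∀ (n : Int) (text : String), Dom_fib_caesar_encrypt n text → Pre_fib_caesar_encrypt n text → Spec_fib_caesar_encrypt n text (fib_caesar_encrypt n text)


-- ===== LEMMAS AND PROOFS =====

theorem pvmod26 (x : Int) : PySem.Int.mod x 26 = x % 26 :=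
  PySem.Int.mod_eq_emod_of_pos (by norm_num)

theorem pvmodeq (x : Int) : x % 26 ≡ x [ZMOD 26] := Int.emod_emod_of_dvd x dvd_rfl

theorem pvc (x y : Int) : (x % 26 * (y % 26 * 2 - x % 26)) % 26 = (x * (2 * y - x)) % 26 :=
  calc (x % 26 * (y % 26 * 2 - x % 26)) % 26
      = (x * (y * 2 - x)) % 26 := (pvmodeq x).mul (((pvmodeq y).mul_right 2).sub (pvmodeq x))
    _ = (x * (2 * y - x)) % 26 := by ring_nf

theorem pvd (x y : Int) : (x % 26 * (x % 26) + y % 26 * (y % 26)) % 26 = (y ^ 2 + x ^ 2) % 26 :=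
  calc (x % 26 * (x % 26) + y % 26 * (y % 26)) % 26
      = (x * x + y * y) % 26 := ((pvmodeq x).mul (pvmodeq x)).add ((pvmodeq y).mul (pvmodeq y))
    _ = (y ^ 2 + x ^ 2) % 26 := by ring_nf

-- A's fast-doubling helper computes (fib k, fib (k+1)) mod 26
theorem pvFibA_eq (k : Nat) : pvFibA k 26 = ((Nat.fib k : Int) % 26, (Nat.fib (k + 1) : Int) % 26) := by
  induction k using Nat.strong_induction_on with
  | _ k ih =>
    rw [pvFibA]
    by_cases h : k = 0
    · simp [h]
    · simp only [h, dite_false, pvmod26]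
      rw [ih (k / 2) (Nat.div_lt_self (Nat.pos_of_ne_zero h) (by norm_num))]
      have hle : Nat.fib (k / 2) ≤ 2 * Nat.fib (k / 2 + 1) :=
        le_trans Nat.fib_le_fib_succ (by omega)
      have hfib2 := Nat.fib_two_mul (k / 2)
      zify [hle] at hfib2
      have hfib3 : (Nat.fib (2 * (k / 2) + 1) : Int)
          = (Nat.fib (k / 2 + 1) : Int) ^ 2 + (Nat.fib (k / 2) : Int) ^ 2 := by
        have := Nat.fib_two_mul_add_one (k / 2)
        zify at this; exact this
      set m := k / 2 with hm
      rcases Nat.mod_two_eq_zero_or_one k with hpar | hpar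
      · -- even
        rw [show k = 2 * m by omega, if_neg (by omega), Prod.mk.injEq, hfib2, hfib3]
        exact ⟨pvc _ _, pvd _ _⟩
      · -- odd
        rw [show k = 2 * m + 1 by omega, if_pos (by omega), Prod.mk.injEq]
        have e1 : ((Nat.fib m : Int) % 26 * ((Nat.fib (m + 1) : Int) % 26 * 2 - (Nat.fib m : Int) % 26)) % 26
            = (Nat.fib (2 * m) : Int) % 26 := by rw [hfib2]; exact pvc _ _
        have e2 : ((Nat.fib m : Int) % 26 * ((Nat.fib m : Int) % 26) + (Nat.fib (m + 1) : Int) % 26 * ((Nat.fib (m + 1) : Int) % 26)) % 26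
            = (Nat.fib (2 * m + 1) : Int) % 26 := by rw [hfib3]; exact pvd _ _
        refine ⟨e2, ?_⟩
        rw [e1, e2, show 2 * m + 1 + 1 = 2 * m + 2 by omega, Nat.fib_add_two]
        push_cast
        exact (pvmodeq _).add (pvmodeq _)

-- B's iterated pair
theorem pvIterB_eq (k j : Nat) :
    pvIterB k ((Nat.fib j : Int) % 26, (Nat.fib (j + 1) : Int) % 26)
      = ((Nat.fib (j + k) : Int) % 26, (Nat.fib (j + k + 1) : Int) % 26) := by
  induction k generalizing j with
  | zero => rfl
  | succ k ih =>
    rw [pvIterB, pvmod26]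
    have : ((Nat.fib j : Int) % 26 + (Nat.fib (j + 1) : Int) % 26) % 26
        = (Nat.fib (j + 1 + 1) : Int) % 26 := by
      rw [Nat.fib_add_two]; push_cast; exact (pvmodeq _).add (pvmodeq _)
    rw [this, ih (j + 1), show j + 1 + k = j + k + 1 from by omega,
      show j + k + 1 = j + (k + 1) from by omega]

-- Fibonacci mod 26 is periodic with period 84 (fib 83 % 26 = 1, fib 84 % 26 = 0)
theorem pvPisano (q m : Nat) : Nat.fib (84 * q + m) % 26 = Nat.fib m % 26 := by
  induction q with
  | zero => simp
  | succ q ih =>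
    rw [show 84 * (q + 1) + m = (84 * q + m) + 83 + 1 by ring, Nat.fib_add,
      Nat.add_mod, Nat.mul_mod, Nat.mul_mod (Nat.fib (84 * q + m + 1)),
      show Nat.fib 83 % 26 = 1 by decide, show Nat.fib 84 % 26 = 0 by decide]
    simp [Nat.mod_mod_of_dvd, ih]

-- loop congruence: states agreeing mod 26 produce the same output
theorem pvLoop_eq (cs : List Char) : ∀ (a b a' b' : Int) (out : List Char),
    a % 26 = a' % 26 → b % 26 = b' % 26 →
    pvLoopA cs a b out = pvLoopB cs a' b' out := by
  induction cs with
  | nil => intros; rfl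
  | cons c cs ih =>
    intro a b a' b' out ha hb
    rw [pvLoopA, pvLoopB]
    by_cases hw : c ∈ pvWhitespace
    · simp only [hw, if_true]
      exact ih a b a' b' _ ha hb
    · simp only [hw, if_false]
      have hsh : PySem.Int.mod (((PySem.List.index? pvAlphabet c).getD 0 : Nat) + PySem.Int.mod a 26) 26
          = PySem.Int.mod (((PySem.List.index? pvAlphabet c).getD 0 : Nat) + a') 26 := by
        rw [pvmod26, pvmod26, pvmod26, Int.add_emod, Int.emod_emod_of_dvd _ (dvd_refl _), ha,
          Int.add_emod _ a']
      rw [hsh]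
      exact ih b (a + b) b' (PySem.Int.mod (a' + b') 26) _ hb
        (by rw [pvmod26, Int.emod_emod_of_dvd _ (dvd_refl _), Int.add_emod, ha, hb, Int.add_emod a'])

-- ===== VERDICT (by name: the statement is the Claim_ definition above) =====
theorem fib_caesar_encrypt_spec : Claim_equal_fib_caesar_encrypt := by
  intro n text _ hpre
  obtain ⟨hn, -⟩ := hpre
  unfold Spec_fib_caesar_encrypt fib_caesar_encrypt fib_caesar_encrypt_alt pvFib
  have hn1 : (n + 1).toNat = n.toNat + 1 := by omega
  rw [hn1, pvFibA_eq, pvFibA_eq, PySem.Int.mod_eq_emod_of_pos (by norm_num : (0:Int) < 84)]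
  have h0 : ((0 : Int), (1 : Int)) = ((Nat.fib 0 : Int) % 26, (Nat.fib 1 : Int) % 26) := by norm_num
  rw [h0, pvIterB_eq]
  simp only [Nat.zero_add]
  -- A starts at (fib n, fib (n+1)) mod 26, B at (fib (n % 84), fib (n % 84 + 1)) mod 26: equal by Pisano periodicity
  have ha : Nat.fib n.toNat % 26 = Nat.fib (n % 84).toNat % 26 := by
    rw [show n.toNat = 84 * (n.toNat / 84) + (n % 84).toNat by omega]
    exact pvPisano _ _
  have hb : Nat.fib (n.toNat + 1) % 26 = Nat.fib ((n % 84).toNat + 1) % 26 := by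
    rw [show n.toNat + 1 = 84 * (n.toNat / 84) + ((n % 84).toNat + 1) by omega]
    exact pvPisano _ _
  have ha' : (Nat.fib n.toNat : Int) % 26 = (Nat.fib (n % 84).toNat : Int) % 26 := by
    exact_mod_cast ha
  have hb' : (Nat.fib (n.toNat + 1) : Int) % 26 = (Nat.fib ((n % 84).toNat + 1) : Int) % 26 := by
    exact_mod_cast hb
  congr 1
  exact pvLoop_eq text.toList _ _ _ _ [] (by rw [ha']) (by rw [hb'])
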